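-- pv_equiv track=rewrite | github.com/derisyan/kekbot | bot/modules/fun.py | restore_case
-- ===== SOURCE A (Python) =====
-- def restore_case(text, cl):
-- 	text = list(text)
-- 	for e in cl:
-- 		try:
-- 			text[e] = text[e].upper()
-- 		except IndexError:
-- 			break
-- 	text = "".join(text)
-- 	return text
-- ===== SOURCE B (Python) =====
-- def restore_case(text, cl):
--     n = len(text)
--     positions = set()
--     for e in cl:
--         if not (-n <= e < n):
--             break
--         positions.add(e + n if e < 0 else e)
--     return "".join(ch.upper() if i in positions else ch for i, ch in enumerate(text))
-- ===== Notes on version B (the rewrite author's own statement) =====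
-- stated objective: alternative
-- what changed: Instead of mutating a character list at each index, B first collects the normalized target positions into a set (stopping at the first out-of-range index like A's break) and then rebuilds the string in a single enumerate pass with a set-membership test.
import Mathlib
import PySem

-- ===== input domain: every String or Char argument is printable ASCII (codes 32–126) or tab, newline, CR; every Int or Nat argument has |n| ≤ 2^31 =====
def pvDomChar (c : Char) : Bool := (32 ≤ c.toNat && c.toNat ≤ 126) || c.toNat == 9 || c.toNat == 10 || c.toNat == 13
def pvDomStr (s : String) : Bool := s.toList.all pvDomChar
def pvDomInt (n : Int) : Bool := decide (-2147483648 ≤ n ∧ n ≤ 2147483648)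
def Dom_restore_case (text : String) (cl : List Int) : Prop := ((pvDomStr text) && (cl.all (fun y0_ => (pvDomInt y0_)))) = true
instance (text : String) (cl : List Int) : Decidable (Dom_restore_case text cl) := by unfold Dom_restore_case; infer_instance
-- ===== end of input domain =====

-- B collects the normalized uppercase positions into a set (stopping at the first
-- out-of-range index, like A's break) and rebuilds the string in one enumerate pass,
-- instead of mutating a character list index by index; same cost, different structure.


-- ===== PORT A =====
-- for e in cl: try: text[e] = text[e].upper() except IndexError: break
def restoreCaseLoopA (xs : List Char) : List Int → List Char
  | [] => xs
  | e :: rest =>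
    match PySem.List.pyGet? xs e with
    | none => xs
    | some c => restoreCaseLoopA (PySem.List.pySetD xs e (PySem.Chars.upperChar c)) rest

def restore_case (text : String) (cl : List Int) : String :=
  String.mk (restoreCaseLoopA text.toList cl)

-- ===== PORT B =====
-- for e in cl: if not (-n <= e < n): break; positions.add(e + n if e < 0 else e)
def restoreCasePosB (n : Int) (s : PySem.Set Int) : List Int → PySem.Set Int
  | [] => s
  | e :: rest =>
    if -n ≤ e ∧ e < n then
      restoreCasePosB n (PySem.Set.add s (if e < 0 then e + n else e)) rest
    else s

-- "".join(ch.upper() if i in positions else ch for i, ch in enumerate(text))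
def restore_case_alt (text : String) (cl : List Int) : String :=
  let n : Int := text.toList.length
  let positions := restoreCasePosB n PySem.Set.empty cl
  String.mk ((PySem.List.enumerate text.toList).map
    (fun p => if PySem.Set.contains positions p.1 then PySem.Chars.upperChar p.2 else p.2))

-- ===== PRECONDITION & SPEC =====
def Spec_restore_case (text : String) (cl : List Int) (out : String) : Prop := out = restore_case_alt text cl
instance (text : String) (cl : List Int) (out : String) : Decidable (Spec_restore_case text cl out) := by unfold Spec_restore_case; infer_instance

-- ===== CLAIM (what is proved, stated in full; the proofs are below) =====
def Claim_equal_restore_case : Prop := ∀ (text : String) (cl : List Int), Dom_restore_case text cl → Spec_restore_case text cl (restore_case text cl)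

-- ===== LEMMAS AND PROOFS =====

-- the (normalized) positions B keeps, as a plain list
def posList (n : Int) : List Int → List Int
  | [] => []
  | e :: rest =>
    if -n ≤ e ∧ e < n then (if e < 0 then e + n else e) :: posList n rest else []

theorem mem_restoreCasePosB (n : Int) (s : PySem.Set Int) (cl : List Int) (i : Int) :
    i ∈ restoreCasePosB n s cl ↔ i ∈ s ∨ i ∈ posList n cl := by
  induction cl generalizing s with
  | nil => simp [restoreCasePosB, posList]
  | cons e rest ih =>
    by_cases h : -n ≤ e ∧ e < n
    · simp only [restoreCasePosB, posList, if_pos h, ih, PySem.Set.mem_add, List.mem_cons]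
      tauto
    · simp [restoreCasePosB, posList, h]

theorem upperChar_idem (c : Char) :
    PySem.Chars.upperChar (PySem.Chars.upperChar c) = PySem.Chars.upperChar c := by
  unfold PySem.Chars.upperChar PySem.Chars.islower
  by_cases h : ('a' ≤ c ∧ c ≤ 'z')
  · have h1 : 97 ≤ c.toNat := UInt32.le_iff_toNat_le.mp (Char.le_def.mp h.1)
    have h2 : c.toNat ≤ 122 := UInt32.le_iff_toNat_le.mp (Char.le_def.mp h.2)
    have hvalid : Nat.isValidChar (c.toNat - 32) := Or.inl (by omega)
    have htn : (Char.ofNat (c.toNat - 32)).toNat = c.toNat - 32 := by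
      rw [Char.toNat_ofNat, if_pos hvalid]
    have hlt : ¬ ('a' ≤ Char.ofNat (c.toNat - 32)) := by
      intro hc
      have h3 : ('a' : Char).toNat ≤ (Char.ofNat (c.toNat - 32)).toNat :=
        UInt32.le_iff_toNat_le.mp (Char.le_def.mp hc)
      rw [htn] at h3
      have ha : ('a' : Char).toNat = 97 := by decide
      omega
    simp [h.1, h.2, hlt]
  · have hb : (decide ('a' ≤ c) && decide (c ≤ 'z')) = false := by
      simp only [Bool.and_eq_false_iff, decide_eq_false_iff_not]
      tauto
    simp [hb]

theorem pyIdx?_inRange (len : Nat) (e : Int) (h1 : -(len : Int) ≤ e) (h2 : e < (len : Int)) :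
    PySem.List.pyIdx? len e = some (if e < 0 then e + len else e).toNat := by
  unfold PySem.List.pyIdx?
  by_cases h0 : 0 ≤ e
  · rw [if_pos h0, if_pos h2, if_neg (by omega)]
  · rw [if_neg h0, if_pos h1, if_pos (by omega)]
    congr 1
    omega

-- A's loop, characterized as one pass over enumerate guided by the positions
theorem loopA_eq (cl : List Int) (xs : List Char) :
    restoreCaseLoopA xs cl =
      (PySem.List.enumerate xs).map
        (fun p => if p.1 ∈ posList (xs.length : Int) cl then PySem.Chars.upperChar p.2 else p.2) := by
  induction cl generalizing xs with
  | nil =>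
    simp only [restoreCaseLoopA, posList, List.not_mem_nil, if_false]
    exact (PySem.List.map_snd_enumerate xs 0).symm
  | cons e rest ih =>
    by_cases h : -(xs.length : Int) ≤ e ∧ e < (xs.length : Int)
    · -- index in range: A updates position k, B records it
      set k : Nat := (if e < 0 then e + (xs.length : Int) else e).toNat with hk
      have hklt : k < xs.length := by rw [hk]; split_ifs <;> omega
      have hki : (k : Int) = (if e < 0 then e + (xs.length : Int) else e) := by
        rw [hk]; split_ifs <;> omega
      have hidx : PySem.List.pyIdx? xs.length e = some k :=
        pyIdx?_inRange xs.length e h.1 h.2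
      have hget : PySem.List.pyGet? xs e = some xs[k] := by
        simp [PySem.List.pyGet?, hidx, List.getElem?_eq_getElem hklt]
      have hset : PySem.List.pySetD xs e (PySem.Chars.upperChar xs[k]) =
          xs.set k (PySem.Chars.upperChar xs[k]) := by
        simp [PySem.List.pySetD, PySem.List.pySet?, hidx]
      rw [show restoreCaseLoopA xs (e :: rest) =
            restoreCaseLoopA (PySem.List.pySetD xs e (PySem.Chars.upperChar xs[k])) rest by
          simp [restoreCaseLoopA, hget]]
      rw [hset, ih]
      apply List.ext_getElem
      · simp [PySem.List.length_enumerate]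
      · intro j hj1 hj2
        have hjlen : j < xs.length := by
          simpa [PySem.List.length_enumerate] using hj1
        have hjset : j < (xs.set k (PySem.Chars.upperChar xs[k])).length := by
          simpa using hjlen
        rw [List.getElem_map, List.getElem_map,
            PySem.List.getElem_enumerate _ _ j (by simpa [PySem.List.length_enumerate] using hjlen),
            PySem.List.getElem_enumerate _ _ j (by simpa [PySem.List.length_enumerate] using hjlen)]
        simp only [List.length_set, List.getElem_set, zero_add, posList, if_pos h, List.mem_cons,
          ← hki]
        by_cases hjk : k = j
        · subst hjk
          by_cases hm : (k : Int) ∈ posList (xs.length : Int) rest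
          · simp [hm, upperChar_idem]
          · simp [hm]
        · have hne : ¬ ((j : Int) = (k : Int)) := by
            intro hcast
            have hjk' : j = k := by exact_mod_cast hcast
            exact hjk hjk'.symm
          by_cases hm : (j : Int) ∈ posList (xs.length : Int) rest
          · simp [hjk, hne, hm]
          · simp [hjk, hne, hm]
    · -- out of range: A breaks, B records nothing more
      have hnone : PySem.List.pyGet? xs e = none := by
        rw [PySem.List.pyGet?_eq_none_iff]
        exact fun hr => h hr
      simp only [restoreCaseLoopA, hnone, posList, if_neg h, List.not_mem_nil, if_false]
      exact (PySem.List.map_snd_enumerate xs 0).symm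

-- ===== VERDICT (by name: the statement is the Claim_ definition above) =====
theorem restore_case_spec : Claim_equal_restore_case := by
  intro text cl _
  unfold Spec_restore_case restore_case restore_case_alt
  rw [loopA_eq]
  apply congrArg String.mk
  apply List.map_congr_left
  intro p _
  by_cases hp : p.1 ∈ posList (text.toList.length : Int) cl
  · rw [if_pos hp, if_pos]
    rw [PySem.Set.contains_iff, mem_restoreCasePosB]
    exact Or.inr hp
  · rw [if_neg hp, if_neg]
    intro hc
    rcases (mem_restoreCasePosB _ _ _ _).mp ((PySem.Set.contains_iff _ _).mp hc) with h0 | h0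
    · simp [PySem.Set.empty] at h0
    · exact hp h0
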